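-- pv_equiv track=rewrite | github.com/curtinrobotics/XYPlotter | main/shapeCreation.py | extractElementDetails
-- ===== SOURCE A (Python) =====
-- DOCTYPE = "doctype"
--
-- COMMENT = "comment"
--
-- CONTENT = "content"
--
-- def extractElementDetails(elementList):
--     detailedElementList = []
--     for item in elementList:
--         elementType = item[0]
--         elementName = item[1].split()[0]
--         elementData = item[1][len(elementName):]
--         elementDict = {}
--
--         # Get element attributes (not all elements have attributes)
--         if elementType in [DOCTYPE, COMMENT, CONTENT]:
--             elementName = item[1]
--         else:
--             inQuote = False
--             quoteType = ""
--             curData = ""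
--             curAttName = ""
--             # attribute name = "data"
--             for char in elementData:
--                 if not inQuote and (char == '"' or char == "'"):  # New data
--                     inQuote = True
--                     quoteType = char
--                 elif inQuote and char == quoteType:  # End data, append attribute
--                     inQuote = False
--                     quoteType = ""
--                     elementDict.update({curAttName: curData})
--                     curData = ""
--                     curAttName = ""
--                 elif inQuote:  # Add data
--                     curData += char
--                 elif not (char.isspace() or char == '='):  # Add attribute name
--                     curAttName += char
--
--         detailedElementList.append((elementType, elementName, elementDict))
--
--     return detailedElementList
-- ===== SOURCE B (Python) =====
-- DOCTYPE = "doctype"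
-- COMMENT = "comment"
-- CONTENT = "content"
--
-- def extractElementDetails(elementList):
--     detailedElementList = []
--     for elementType, raw in elementList:
--         elementName = raw.split()[0]
--         if elementType in (DOCTYPE, COMMENT, CONTENT):
--             detailedElementList.append((elementType, raw, {}))
--             continue
--         data = raw[len(elementName):]
--         elementDict = {}
--         pos = 0
--         while True:
--             # earliest quote of either kind at or after pos
--             cands = [i for i in (data.find('"', pos), data.find("'", pos)) if i != -1]
--             if not cands:
--                 break
--             qpos = min(cands)
--             q = data[qpos]
--             name = ''.join(c for c in data[pos:qpos] if not c.isspace() and c != '=')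
--             end = data.find(q, qpos + 1)
--             if end == -1:
--                 break
--             elementDict[name] = data[qpos + 1:end]
--             pos = end + 1
--         detailedElementList.append((elementType, elementName, elementDict))
--     return detailedElementList
-- ===== Notes on version B (the rewrite author's own statement) =====
-- stated objective: alternative
-- what changed: The attribute branch's char-by-char inQuote/quoteType/curData/curAttName state machine is replaced by a cursor scan that repeatedly finds the next quote, slices out the name (filtered) and the quoted data between the matching quotes, and jumps past the closing quote.
import Mathlib
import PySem

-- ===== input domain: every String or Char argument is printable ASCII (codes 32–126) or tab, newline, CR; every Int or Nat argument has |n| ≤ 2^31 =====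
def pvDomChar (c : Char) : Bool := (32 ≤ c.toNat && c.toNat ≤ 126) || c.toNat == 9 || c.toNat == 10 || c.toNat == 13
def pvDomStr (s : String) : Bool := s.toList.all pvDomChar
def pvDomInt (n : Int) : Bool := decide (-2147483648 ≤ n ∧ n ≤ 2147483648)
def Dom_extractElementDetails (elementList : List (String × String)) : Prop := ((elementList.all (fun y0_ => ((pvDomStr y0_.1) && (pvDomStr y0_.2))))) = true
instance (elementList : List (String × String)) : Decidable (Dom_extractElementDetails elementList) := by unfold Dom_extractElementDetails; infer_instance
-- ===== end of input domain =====

-- B replaces A's char-by-char quote state machine with a quote-to-quote scan (find the next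
-- quote, slice out the attribute name and the quoted data); objective: alternative decomposition.

def pvDOCTYPE : String := "doctype"
def pvCOMMENT : String := "comment"
def pvCONTENT : String := "content"

-- ===== PORT A =====
-- one step of A's state machine: (inQuote, quoteType, curData, curAttName, elementDict).
-- Python's quoteType is the string "" outside a quote; it is only ever compared while
-- inQuote, so the port keeps a Char with dummy ' ' there.  curData/curAttName are kept as
-- List Char (Python str concatenation char by char).
def pvAttrStep (st : Bool × Char × List Char × List Char × PySem.Dict String String) (c : Char) :
    Bool × Char × List Char × List Char × PySem.Dict String String :=
  match st with
  | (inQ, qT, cD, cA, d) =>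
    if !inQ && (c == '"' || c == '\'') then (true, c, cD, cA, d)
    else if inQ && c == qT then
      (false, ' ', [], [], d.insert (String.ofList cA) (String.ofList cD))
    else if inQ then (inQ, qT, cD ++ [c], cA, d)
    else if !(PySem.Chars.isspace c || c == '=') then (inQ, qT, cD, cA ++ [c], d)
    else (inQ, qT, cD, cA, d)

-- Pre_ guarantees split() is nonempty, so headD's default is never used.
def pvProcA (item : String × String) : String × String × List (String × String) :=
  let elementType := item.1
  let elementName := (PySem.Str.split₀ item.2).headD ""
  let elementData := PySem.Str.slice item.2 (some (PySem.Str.len elementName)) none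
  if [pvDOCTYPE, pvCOMMENT, pvCONTENT].contains elementType then
    (elementType, item.2, ([] : List (String × String)))
  else
    (elementType, elementName,
      ((elementData.toList.foldl pvAttrStep
        (false, ' ', [], [], PySem.Dict.empty)).2.2.2.2).items)

def extractElementDetails (elementList : List (String × String)) :
    List (String × String × (List (String × String))) :=
  elementList.map pvProcA

-- ===== PORT B =====
def pvIsQuote (c : Char) : Bool := c == '"' || c == '\''

def pvNamePart (c : Char) : Bool := !(PySem.Chars.isspace c || c == '=')

-- B's scan: find the next quote (data.find for either quote char = dropWhile over the chars),
-- the name is the filtered slice before it, the data the slice up to the matching quote.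
def pvScanB (cs : List Char) (d : PySem.Dict String String) : PySem.Dict String String :=
  match h : cs.dropWhile (fun c => !pvIsQuote c) with
  | [] => d
  | q :: rest =>
    let name := String.ofList ((cs.takeWhile (fun c => !pvIsQuote c)).filter pvNamePart)
    match h2 : rest.dropWhile (fun c => c != q) with
    | [] => d
    | _ :: rest2 =>
      pvScanB rest2 (d.insert name (String.ofList (rest.takeWhile (fun c => c != q))))
termination_by cs.length
decreasing_by
  have t1 : (cs.dropWhile (fun c => !pvIsQuote c)).length ≤ cs.length :=
    List.length_dropWhile_le _ _
  have t2 : (rest.dropWhile (fun c => c != q)).length ≤ rest.length :=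
    List.length_dropWhile_le _ _
  rw [h] at t1; rw [h2] at t2
  simp at t1 t2; omega

def pvProcB (item : String × String) : String × String × List (String × String) :=
  let elementName := (PySem.Str.split₀ item.2).headD ""
  if [pvDOCTYPE, pvCOMMENT, pvCONTENT].contains item.1 then
    (item.1, item.2, ([] : List (String × String)))
  else
    (item.1, elementName,
      (pvScanB (item.2.toList.drop elementName.toList.length) PySem.Dict.empty).items)

def extractElementDetails_alt (elementList : List (String × String)) :
    List (String × String × (List (String × String))) :=
  elementList.map pvProcB

-- ===== PRECONDITION & SPEC =====
-- Pre_ excludes exactly the inputs where some item's text is empty or all whitespace: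
-- there Python A raises IndexError on item[1].split()[0] (and B raises the same way).
def Pre_extractElementDetails (elementList : List (String × String)) : Prop :=
  (elementList.all (fun item => item.2.toList.any (fun c => !PySem.Chars.isspace c))) = true
instance (elementList : List (String × String)) : Decidable (Pre_extractElementDetails elementList) := by
  unfold Pre_extractElementDetails; infer_instance

def pvWitness_extractElementDetails : (List (String × String)) :=
  [("div", "div a=\"1\" b='x y'"), ("content", "hello world")]

def Spec_extractElementDetails (elementList : List (String × String)) (out : List (String × String × (List (String × String)))) : Prop := out = extractElementDetails_alt elementList
instance (elementList : List (String × String)) (out : List (String × String × (List (String × String)))) : Decidable (Spec_extractElementDetails elementList out) := by unfold Spec_extractElementDetails; infer_instance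

-- ===== CLAIM (what is proved, stated in full; the proofs are below) =====
def Claim_equal_extractElementDetails : Prop := ∀ (elementList : List (String × String)), Dom_extractElementDetails elementList → Pre_extractElementDetails elementList → Spec_extractElementDetails elementList (extractElementDetails elementList)

-- ===== LEMMAS AND PROOFS =====

-- proof-side variant of pvScanB carrying the pending attribute-name prefix
def pvScanAux (cs : List Char) (cA : List Char) (d : PySem.Dict String String) :
    PySem.Dict String String :=
  match h : cs.dropWhile (fun c => !pvIsQuote c) with
  | [] => d
  | q :: rest =>
    let name := String.ofList (cA ++ (cs.takeWhile (fun c => !pvIsQuote c)).filter pvNamePart)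
    match h2 : rest.dropWhile (fun c => c != q) with
    | [] => d
    | _ :: rest2 =>
      pvScanAux rest2 [] (d.insert name (String.ofList (rest.takeWhile (fun c => c != q))))
termination_by cs.length
decreasing_by
  have t1 : (cs.dropWhile (fun c => !pvIsQuote c)).length ≤ cs.length :=
    List.length_dropWhile_le _ _
  have t2 : (rest.dropWhile (fun c => c != q)).length ≤ rest.length :=
    List.length_dropWhile_le _ _
  rw [h] at t1; rw [h2] at t2
  simp at t1 t2; omega

-- head of a nonempty dropWhile fails the predicate
lemma pvDropWhile_head_false {α : Type} (p : α → Bool) :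
    ∀ (l : List α) {x : α} {xs : List α}, l.dropWhile p = x :: xs → p x = false := by
  intro l
  induction l with
  | nil => intro x xs h; simp at h
  | cons a l ih =>
      intro x xs h
      rw [List.dropWhile_cons] at h
      split at h
      · exact ih h
      · rename_i hp
        cases h
        simpa using hp

-- characterizations of the two scanners, one per match branch
lemma pvScanB_none (cs : List Char) (d : PySem.Dict String String)
    (h : cs.dropWhile (fun c => !pvIsQuote c) = []) : pvScanB cs d = d := by
  rw [pvScanB]; split
  · rfl
  · rename_i q rest heq; rw [h] at heq; cases heq

lemma pvScanB_noclose (cs : List Char) (d : PySem.Dict String String) (q : Char)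
    (rest : List Char) (h : cs.dropWhile (fun c => !pvIsQuote c) = q :: rest)
    (h2 : rest.dropWhile (fun c => c != q) = []) : pvScanB cs d = d := by
  rw [pvScanB]; split
  · rfl
  · rename_i q' rest' heq
    rw [h] at heq; injection heq with hq hr; subst hq; subst hr
    split
    · rfl
    · rename_i x rest2 heq2; rw [h2] at heq2; cases heq2

lemma pvScanB_step (cs : List Char) (d : PySem.Dict String String) (q x : Char)
    (rest rest2 : List Char) (h : cs.dropWhile (fun c => !pvIsQuote c) = q :: rest)
    (h2 : rest.dropWhile (fun c => c != q) = x :: rest2) :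
    pvScanB cs d = pvScanB rest2
      (d.insert (String.ofList ((cs.takeWhile (fun c => !pvIsQuote c)).filter pvNamePart))
        (String.ofList (rest.takeWhile (fun c => c != q)))) := by
  conv_lhs => rw [pvScanB]
  split
  · rename_i heq; rw [h] at heq; cases heq
  · rename_i q' rest' heq
    rw [h] at heq; injection heq with hq hr; subst hq; subst hr
    split
    · rename_i heq2; rw [h2] at heq2; cases heq2
    · rename_i x' rest2' heq2
      rw [h2] at heq2; injection heq2 with hx hr2; subst hr2; rfl

lemma pvScanAux_none (cs cA : List Char) (d : PySem.Dict String String)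
    (h : cs.dropWhile (fun c => !pvIsQuote c) = []) : pvScanAux cs cA d = d := by
  rw [pvScanAux]; split
  · rfl
  · rename_i q rest heq; rw [h] at heq; cases heq

lemma pvScanAux_noclose (cs cA : List Char) (d : PySem.Dict String String) (q : Char)
    (rest : List Char) (h : cs.dropWhile (fun c => !pvIsQuote c) = q :: rest)
    (h2 : rest.dropWhile (fun c => c != q) = []) : pvScanAux cs cA d = d := by
  rw [pvScanAux]; split
  · rfl
  · rename_i q' rest' heq
    rw [h] at heq; injection heq with hq hr; subst hq; subst hr
    split
    · rfl
    · rename_i x rest2 heq2; rw [h2] at heq2; cases heq2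

lemma pvScanAux_step (cs cA : List Char) (d : PySem.Dict String String) (q x : Char)
    (rest rest2 : List Char) (h : cs.dropWhile (fun c => !pvIsQuote c) = q :: rest)
    (h2 : rest.dropWhile (fun c => c != q) = x :: rest2) :
    pvScanAux cs cA d = pvScanAux rest2 []
      (d.insert (String.ofList (cA ++ (cs.takeWhile (fun c => !pvIsQuote c)).filter pvNamePart))
        (String.ofList (rest.takeWhile (fun c => c != q)))) := by
  conv_lhs => rw [pvScanAux]
  split
  · rename_i heq; rw [h] at heq; cases heq
  · rename_i q' rest' heq
    rw [h] at heq; injection heq with hq hr; subst hq; subst hr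
    split
    · rename_i heq2; rw [h2] at heq2; cases heq2
    · rename_i x' rest2' heq2
      rw [h2] at heq2; injection heq2 with hx hr2; subst hr2; rfl

lemma pvScanAux_nil (n : ℕ) : ∀ (cs : List Char), cs.length ≤ n →
    ∀ (d : PySem.Dict String String), pvScanAux cs [] d = pvScanB cs d := by
  induction n with
  | zero =>
      intro cs hcs d
      have : cs = [] := by cases cs <;> simp_all
      subst this
      rw [pvScanAux_none _ _ _ rfl, pvScanB_none _ _ rfl]
  | succ n ih =>
      intro cs hcs d
      rcases hdrop : cs.dropWhile (fun c => !pvIsQuote c) with _ | ⟨q, rest⟩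
      · rw [pvScanAux_none _ _ _ hdrop, pvScanB_none _ _ hdrop]
      · rcases hdrop2 : rest.dropWhile (fun c => c != q) with _ | ⟨x, rest2⟩
        · rw [pvScanAux_noclose _ _ _ _ _ hdrop hdrop2, pvScanB_noclose _ _ _ _ hdrop hdrop2]
        · rw [pvScanAux_step _ _ _ _ _ _ _ hdrop hdrop2, pvScanB_step _ _ _ _ _ _ hdrop hdrop2]
          have hlen : rest2.length ≤ n := by
            have t1 : (cs.dropWhile (fun c => !pvIsQuote c)).length ≤ cs.length :=
              List.length_dropWhile_le _ _
            have t2 : (rest.dropWhile (fun c => c != q)).length ≤ rest.length :=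
              List.length_dropWhile_le _ _
            rw [hdrop] at t1; rw [hdrop2] at t2
            simp at t1 t2; omega
          rw [ih rest2 hlen]
          simp

-- folding A's machine over quote-free chars outside a quote only filters name chars
lemma pvFold_noquote (pre : List Char) (hpre : ∀ c ∈ pre, !pvIsQuote c)
    (qT : Char) (cA : List Char) (d : PySem.Dict String String) :
    pre.foldl pvAttrStep (false, qT, [], cA, d)
      = (false, qT, [], cA ++ pre.filter pvNamePart, d) := by
  induction pre generalizing cA with
  | nil => simp
  | cons c cs ih =>
      have hc : !pvIsQuote c := hpre c (List.mem_cons_self)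
      have hrest : ∀ x ∈ cs, !pvIsQuote x := fun x hx => hpre x (List.mem_cons_of_mem _ hx)
      simp only [pvIsQuote, Bool.not_eq_eq_eq_not, Bool.not_true] at hc
      rw [List.foldl_cons]
      simp only [pvAttrStep]
      split_ifs with h1 h2 h3 h4
      · rw [hc] at h1; simp at h1
      · simp at h2
      · simp at h3
      · rw [ih hrest]
        have hn : pvNamePart c = true := by simpa [pvNamePart] using h4
        simp [List.filter_cons, hn]
      · rw [ih hrest]
        have hn : pvNamePart c = false := by simpa [pvNamePart] using h4
        simp [List.filter_cons, hn]

-- folding A's machine inside a quote over chars ≠ q accumulates them as data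
lemma pvFold_inquote (mid : List Char) (q : Char) (hmid : ∀ c ∈ mid, c ≠ q)
    (cD cA : List Char) (d : PySem.Dict String String) :
    mid.foldl pvAttrStep (true, q, cD, cA, d) = (true, q, cD ++ mid, cA, d) := by
  induction mid generalizing cD with
  | nil => simp
  | cons c cs ih =>
      have hc : (c == q) = false := by
        simp [hmid c (List.mem_cons_self)]
      have hrest : ∀ x ∈ cs, x ≠ q := fun x hx => hmid x (List.mem_cons_of_mem _ hx)
      rw [List.foldl_cons]
      simp only [pvAttrStep]
      split_ifs with h1 h2
      · simp at h1
      · rw [hc] at h2; simp at h2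
      · rw [ih hrest]; simp

-- main invariant: A's machine from a fresh (out-of-quote) state computes B's scan
lemma pvMachine_eq_scan (n : ℕ) : ∀ (cs : List Char), cs.length ≤ n →
    ∀ (qT : Char) (cA : List Char) (d : PySem.Dict String String),
    (cs.foldl pvAttrStep (false, qT, [], cA, d)).2.2.2.2 = pvScanAux cs cA d := by
  induction n with
  | zero =>
      intro cs hcs qT cA d
      have : cs = [] := by cases cs <;> simp_all
      subst this
      rw [pvScanAux_none _ _ _ rfl]; simp
  | succ n ih =>
      intro cs hcs qT cA d
      have hsplit := List.takeWhile_append_dropWhile (p := fun c => !pvIsQuote c) (l := cs)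
      set pre := cs.takeWhile (fun c => !pvIsQuote c) with hpre
      have hprem : ∀ c ∈ pre, !pvIsQuote c := by
        intro c hc
        rw [hpre] at hc
        exact List.mem_takeWhile_imp (p := fun c => !pvIsQuote c) hc
      rcases hdrop : cs.dropWhile (fun c => !pvIsQuote c) with _ | ⟨q, rest⟩
      · -- no quote at all: machine never commits, scan returns d
        have hcs' : cs = pre := by rw [← hsplit, hdrop, List.append_nil]
        rw [pvScanAux_none _ _ _ hdrop]
        conv_lhs => rw [hcs']
        rw [pvFold_noquote pre hprem]
      · -- cs = pre ++ q :: rest, q a quote char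
        have hq : pvIsQuote q := by
          have := pvDropWhile_head_false (fun c => !pvIsQuote c) cs hdrop
          simpa using this
        have hcs' : cs = pre ++ q :: rest := by rw [← hsplit, hdrop]
        have hstep : pvAttrStep (false, qT, [], cA ++ pre.filter pvNamePart, d) q
            = (true, q, [], cA ++ pre.filter pvNamePart, d) := by
          simp only [pvAttrStep, Bool.not_false, Bool.true_and]
          rw [if_pos (by simpa [pvIsQuote] using hq)]
        have hsplit2 := List.takeWhile_append_dropWhile (p := fun c => c != q) (l := rest)
        set mid := rest.takeWhile (fun c => c != q) with hmid
        have hmidm : ∀ c ∈ mid, c ≠ q := by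
          intro c hc
          rw [hmid] at hc
          have := List.mem_takeWhile_imp (p := fun c => c != q) hc
          simpa using this
        rcases hdrop2 : rest.dropWhile (fun c => c != q) with _ | ⟨q2, rest2⟩
        · -- quote never closed: machine stays in quote, never commits
          have hrest' : rest = mid := by rw [← hsplit2, hdrop2, List.append_nil]
          rw [pvScanAux_noclose _ _ _ _ _ hdrop hdrop2]
          conv_lhs => rw [hcs']
          rw [List.foldl_append, pvFold_noquote pre hprem, List.foldl_cons, hstep]
          conv_lhs => rw [hrest']
          rw [pvFold_inquote mid q hmidm]
        · have hq2 : q2 = q := by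
            have := pvDropWhile_head_false (fun c => c != q) rest hdrop2
            simpa using this
          rw [pvScanAux_step _ _ _ _ _ _ _ hdrop hdrop2]
          have hrest' : rest = mid ++ q2 :: rest2 := by rw [← hsplit2, hdrop2]
          conv_lhs => rw [hcs']
          rw [List.foldl_append, pvFold_noquote pre hprem, List.foldl_cons, hstep]
          conv_lhs => rw [hrest']
          rw [List.foldl_append, pvFold_inquote mid q hmidm, List.foldl_cons]
          have hstep2 : pvAttrStep (true, q, [] ++ mid, cA ++ pre.filter pvNamePart, d) q2
              = (false, ' ', [], [],
                  d.insert (String.ofList (cA ++ pre.filter pvNamePart)) (String.ofList mid)) := by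
            simp only [pvAttrStep, Bool.not_true, Bool.false_and, Bool.false_eq_true,
              if_false, Bool.true_and, hq2, beq_self_eq_true, if_pos rfl]
            simp
          rw [hstep2]
          have hlen : rest2.length ≤ n := by
            have h1 : cs.length = pre.length + 1 + rest.length := by
              rw [hcs']; simp; omega
            have h2 : rest.length = mid.length + 1 + rest2.length := by
              rw [hrest']; simp; omega
            omega
          rw [ih rest2 hlen]

-- the two per-item functions agree
lemma pvProc_eq (item : String × String) : pvProcA item = pvProcB item := by
  unfold pvProcA pvProcB
  by_cases hty : [pvDOCTYPE, pvCOMMENT, pvCONTENT].contains item.1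
  · rw [if_pos hty, if_pos hty]
  · rw [if_neg hty, if_neg hty]
    have hdata : (PySem.Str.slice item.2
        (some (PySem.Str.len ((PySem.Str.split₀ item.2).headD "")))
        none).toList
        = item.2.toList.drop ((PySem.Str.split₀ item.2).headD "").toList.length := by
      rw [PySem.Str.toList_slice, PySem.Str.len]
      simp only [PySem.Chars.slice_eq_listSlice, PySem.Chars.len]
      rw [PySem.List.slice_from_natCast]
    rw [hdata]
    rw [pvMachine_eq_scan (item.2.toList.drop
          ((PySem.Str.split₀ item.2).headD "").toList.length).length _ le_rfl]
    rw [pvScanAux_nil (item.2.toList.drop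
          ((PySem.Str.split₀ item.2).headD "").toList.length).length _ le_rfl]

-- ===== VERDICT (by name: the statement is the Claim_ definition above) =====
theorem extractElementDetails_spec : Claim_equal_extractElementDetails := by
  intro elementList _ _
  unfold Spec_extractElementDetails extractElementDetails extractElementDetails_alt
  exact List.map_congr_left (fun item _ => pvProc_eq item)
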